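-- pv_equiv track=rewrite | github.com/tamlog06/AntBook | 2-3/knapsack/TDPC_B.py | solve
-- ===== SOURCE A (Python) =====
-- def solve(A, B, a, b):
--     dp = [[0]*(B+1) for _ in range(A+1)]
--     dp[0][0] = 0
--     for i in range(1, A+1):
--         dp[i][0] = a[-i] - dp[i-1][0]
--
--     for i in range(1, B+1):
--         dp[0][i] = b[-i] - dp[0][i-1]
--
--     for i in range(1, A+1):
--         for j in range(1, B+1):
--             dp[i][j] = max(a[-i] - dp[i-1][j], b[-j] - dp[i][j-1])
--
--     ans = (sum(a) + sum(b) + dp[A][B]) // 2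
--     return ans
-- ===== SOURCE B (Python) =====
-- def solve(A, B, a, b):
--     # Top-down memoized evaluation of the game value g(i, j) (optimal score
--     # difference with i cards left in a and j left in b), computed by a
--     # depth-first descent with an explicit stack instead of a bottom-up table.
--     memo = {}
--     stack = [(A, B)]
--     while stack:
--         i, j = stack[-1]
--         if (i, j) in memo:
--             stack.pop()
--             continue
--         if i == 0 and j == 0:
--             memo[i, j] = 0
--             stack.pop()
--             continue
--         pending = []
--         if i > 0 and (i - 1, j) not in memo:
--             pending.append((i - 1, j))
--         if j > 0 and (i, j - 1) not in memo:
--             pending.append((i, j - 1))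
--         if pending:
--             stack.extend(pending)
--             continue
--         if j == 0:
--             v = a[-i] - memo[i - 1, j]
--         elif i == 0:
--             v = b[-j] - memo[i, j - 1]
--         else:
--             v = max(a[-i] - memo[i - 1, j], b[-j] - memo[i, j - 1])
--         memo[i, j] = v
--         stack.pop()
--     return (sum(a) + sum(b) + memo[A, B]) // 2
-- ===== Notes on version B (the rewrite author's own statement) =====
-- stated objective: alternative
-- what changed: Replaces the bottom-up (A+1)x(B+1) table with three fill loops by top-down memoized evaluation of the same game value: a depth-first descent driven by an explicit stack, computing only cells demanded from (A,B) and caching them in a dict.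
import Mathlib
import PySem

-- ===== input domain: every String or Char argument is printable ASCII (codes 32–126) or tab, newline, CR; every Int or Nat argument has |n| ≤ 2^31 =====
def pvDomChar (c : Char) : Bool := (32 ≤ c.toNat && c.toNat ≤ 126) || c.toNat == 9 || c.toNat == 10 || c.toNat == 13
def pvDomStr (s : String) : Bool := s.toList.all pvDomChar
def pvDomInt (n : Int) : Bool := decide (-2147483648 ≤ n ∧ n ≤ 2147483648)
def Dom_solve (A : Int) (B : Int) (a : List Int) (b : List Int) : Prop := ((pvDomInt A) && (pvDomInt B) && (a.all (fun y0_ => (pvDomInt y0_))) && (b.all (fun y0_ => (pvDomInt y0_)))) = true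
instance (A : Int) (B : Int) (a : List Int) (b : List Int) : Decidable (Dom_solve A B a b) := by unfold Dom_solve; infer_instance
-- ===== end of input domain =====

-- B replaces A's bottom-up (A+1)×(B+1) table by top-down memoized evaluation of the same
-- game value: an explicit-stack depth-first descent from (A,B) caching results in a dict
-- (objective: alternative).

-- xs[i] (possibly negative index); the default 0 is never read on inputs satisfying Pre_solve
def pvIdx (xs : List Int) (i : Int) : Int := (PySem.List.pyGet? xs i).getD 0

-- dp[i][j] read / "dp[i][j] = v" write; A only uses nonnegative in-range indices under Pre_solve
def pvGet2 (dp : List (List Int)) (i j : Int) : Int := pvIdx ((PySem.List.pyGet? dp i).getD []) j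
def pvSet2 (dp : List (List Int)) (i j : Int) (v : Int) : List (List Int) :=
  dp.set i.toNat (((PySem.List.pyGet? dp i).getD []).set j.toNat v)

-- ===== PORT A =====
def solve (A : Int) (B : Int) (a : List Int) (b : List Int) : Int :=
  let dp0 := (PySem.List.pyRange 0 (A+1) 1).map (fun _ => List.replicate (B+1).toNat (0:Int))
  let dp1 := pvSet2 dp0 0 0 0
  let dp2 := (PySem.List.pyRange 1 (A+1) 1).foldl
      (fun dp i => pvSet2 dp i 0 (pvIdx a (-i) - pvGet2 dp (i-1) 0)) dp1
  let dp3 := (PySem.List.pyRange 1 (B+1) 1).foldl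
      (fun dp j => pvSet2 dp 0 j (pvIdx b (-j) - pvGet2 dp 0 (j-1))) dp2
  let dp4 := (PySem.List.pyRange 1 (A+1) 1).foldl (fun dp i =>
      (PySem.List.pyRange 1 (B+1) 1).foldl (fun dp j =>
        pvSet2 dp i j (max (pvIdx a (-i) - pvGet2 dp (i-1) j)
                           (pvIdx b (-j) - pvGet2 dp i (j-1)))) dp) dp3
  PySem.Int.floordiv (a.sum + b.sum + pvGet2 dp4 A B) 2

-- ===== PORT B =====
-- the value computed for cell (i, j) once its needed neighbours are memoized
-- (Python's memo[i-1,j] / memo[i,j-1] reads; .getD 0 is never hit on the reached states)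
def pvVal (a b : List Int) (m : PySem.Dict (Int × Int) Int) (i j : Int) : Int :=
  if j = 0 then pvIdx a (-i) - (m.get? (i - 1, j)).getD 0
  else if i = 0 then pvIdx b (-j) - (m.get? (i, j - 1)).getD 0
  else max (pvIdx a (-i) - (m.get? (i - 1, j)).getD 0)
           (pvIdx b (-j) - (m.get? (i, j - 1)).getD 0)

-- Python's 'while stack:' loop; the stack's top is the list head (Python: the last element,
-- so stack.extend(pending) becomes pending.reverse ++ ·). The fuel argument is only a
-- totality guard (proved sufficient on Pre_solve inputs); each iteration is one loop pass.
def pvDfs (a b : List Int) : Nat → List (Int × Int) → PySem.Dict (Int × Int) Int →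
    PySem.Dict (Int × Int) Int
  | 0, _, m => m
  | _ + 1, [], m => m
  | f + 1, (i, j) :: st, m =>
    if (m.get? (i, j)).isSome then pvDfs a b f st m
    else if i = 0 ∧ j = 0 then pvDfs a b f st (m.insert (i, j) 0)
    else
      let pending := (if 0 < i ∧ (m.get? (i - 1, j)).isNone then [(i - 1, j)] else []) ++
                     (if 0 < j ∧ (m.get? (i, j - 1)).isNone then [(i, j - 1)] else [])
      if pending = [] then pvDfs a b f st (m.insert (i, j) (pvVal a b m i j))
      else pvDfs a b f (pending.reverse ++ (i, j) :: st) m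

def solve_alt (A : Int) (B : Int) (a : List Int) (b : List Int) : Int :=
  let memo := pvDfs a b (2 ^ (A.toNat + B.toNat + 2)) [(A, B)] PySem.Dict.empty
  PySem.Int.floordiv (a.sum + b.sum + (memo.get? (A, B)).getD 0) 2

-- ===== PRECONDITION & SPEC =====
-- Pre_solve excludes exactly the inputs where the Python A raises IndexError:
-- negative A or B (the table has no row/column to index) and A > len(a) or B > len(b)
-- (a[-i] / b[-j] out of range).
def Pre_solve (A : Int) (B : Int) (a : List Int) (b : List Int) : Prop :=
  0 ≤ A ∧ 0 ≤ B ∧ A ≤ (a.length : Int) ∧ B ≤ (b.length : Int)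
instance (A : Int) (B : Int) (a : List Int) (b : List Int) : Decidable (Pre_solve A B a b) := by
  unfold Pre_solve; infer_instance

def pvWitness_solve : Int × Int × List Int × List Int := (2, 1, [3, 5], [4])

def Spec_solve (A : Int) (B : Int) (a : List Int) (b : List Int) (out : Int) : Prop := out = solve_alt A B a b
instance (A : Int) (B : Int) (a : List Int) (b : List Int) (out : Int) : Decidable (Spec_solve A B a b out) := by
  unfold Spec_solve; infer_instance

-- ===== CLAIM (what is proved, stated in full; the proofs are below) =====
def Claim_equal_solve : Prop := ∀ (A : Int) (B : Int) (a : List Int) (b : List Int), Dom_solve A B a b → Pre_solve A B a b → Spec_solve A B a b (solve A B a b)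

-- ===== LEMMAS AND PROOFS =====

-- pvG a b i j is the game value both programs compute: the optimal score
-- difference with i cards left in a and j cards left in b
def pvG (a b : List Int) : Nat → Nat → Int
  | 0, 0 => 0
  | (i+1), 0 => pvIdx a (-((i:Int)+1)) - pvG a b i 0
  | 0, (j+1) => pvIdx b (-((j:Int)+1)) - pvG a b 0 j
  | (i+1), (j+1) => max (pvIdx a (-((i:Int)+1)) - pvG a b i (j+1))
                        (pvIdx b (-((j:Int)+1)) - pvG a b (i+1) j)

-- ---------- A-side: the table is dpMat of pvG ----------

def dpMat (f : Nat → Nat → Int) (N M : Nat) : List (List Int) :=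
  (List.range N).map (fun i => (List.range M).map (f i))

lemma pyRange_natcast (m : Nat) :
    PySem.List.pyRange 1 ((m:Int)+1) 1 = List.map (fun k : Nat => 1 + (k:Int)) (List.range m) := by
  induction m with
  | zero => simp [PySem.List.pyRange_one_eq_nil]
  | succ n ih =>
    have h1 : ((n+1:Nat):Int) + 1 = ((n:Int)+1) + 1 := by push_cast; ring
    rw [h1, PySem.List.pyRange_one_succ_right (by omega), ih, List.range_succ, List.map_append]
    norm_num [add_comm]

lemma map_range_set (g : Nat → Int) (n k : Nat) (v : Int) :
    ((List.range n).map g).set k v = (List.range n).map (fun x => if x = k then v else g x) := by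
  apply List.ext_getElem
  · simp
  · intro i h1 h2
    simp only [List.getElem_set, List.getElem_map, List.getElem_range]
    split_ifs with h h' h'
    · rfl
    · exact absurd h.symm h'
    · exact absurd h'.symm h
    · rfl

lemma dpMat_congr (f f' : Nat → Nat → Int) (N M : Nat)
    (h : ∀ i < N, ∀ j < M, f i j = f' i j) : dpMat f N M = dpMat f' N M := by
  unfold dpMat
  apply List.map_congr_left
  intro i hi
  simp only [List.mem_range] at hi
  apply List.map_congr_left
  intro j hj
  simp only [List.mem_range] at hj
  exact h i hi j hj

lemma dpMat_get (f : Nat → Nat → Int) (N M i j : Nat) (hi : i < N) (hj : j < M) :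
    pvGet2 (dpMat f N M) (i : Int) (j : Int) = f i j := by
  simp [pvGet2, dpMat, pvIdx, hi, hj]

lemma dpMat_set (f : Nat → Nat → Int) (N M i j : Nat) (hi : i < N) (_hj : j < M) (v : Int) :
    pvSet2 (dpMat f N M) (i : Int) (j : Int) v
      = dpMat (fun i' j' => if i' = i ∧ j' = j then v else f i' j') N M := by
  simp only [pvSet2, dpMat, PySem.List.pyGet?_natCast, Int.toNat_natCast]
  have hrow : ((List.map (fun i => List.map (f i) (List.range M)) (List.range N))[(i:Nat)]?).getD ([]:List Int)
      = List.map (f i) (List.range M) := by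
    simp [hi]
  rw [hrow, map_range_set]
  apply List.ext_getElem
  · simp
  · intro x h1 h2
    simp only [List.length_set, List.length_map, List.length_range] at h1
    rw [List.getElem_set]
    by_cases hx : x = i
    · subst hx
      rw [if_pos rfl]
      simp only [List.getElem_map, List.getElem_range]
      apply List.map_congr_left
      intro j' _
      by_cases hj' : j' = j <;> simp [hj']
    · rw [if_neg (fun h => hx h.symm)]
      simp only [List.getElem_map, List.getElem_range]
      apply List.map_congr_left
      intro j' _
      simp [hx]

lemma pvG_zero_succ (a b : List Int) (j : Nat) :
    pvG a b 0 (j+1) = pvIdx b (-(1+(j:Int))) - pvG a b 0 j := by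
  rw [pvG]; ring_nf

lemma pvG_succ_zero (a b : List Int) (i : Nat) :
    pvG a b (i+1) 0 = pvIdx a (-(1+(i:Int))) - pvG a b i 0 := by
  rw [pvG]; ring_nf

lemma pvG_succ_succ (a b : List Int) (i j : Nat) :
    pvG a b (i+1) (j+1) = max (pvIdx a (-(1+(i:Int))) - pvG a b i (j+1))
                              (pvIdx b (-(1+(j:Int))) - pvG a b (i+1) j) := by
  rw [pvG]; ring_nf

lemma dpMat_get' (f : Nat → Nat → Int) (N M : Nat) (i j : Int)
    (hi0 : 0 ≤ i) (hi : i < (N:Int)) (hj0 : 0 ≤ j) (hj : j < (M:Int)) :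
    pvGet2 (dpMat f N M) i j = f i.toNat j.toNat := by
  have h1 : i = ((i.toNat : Nat) : Int) := by omega
  have h2 : j = ((j.toNat : Nat) : Int) := by omega
  rw [h1, h2, dpMat_get f N M i.toNat j.toNat (by omega) (by omega)]
  simp only [Int.toNat_natCast]

lemma dpMat_set' (f : Nat → Nat → Int) (N M : Nat) (i j : Int) (v : Int)
    (hi0 : 0 ≤ i) (hi : i < (N:Int)) (hj0 : 0 ≤ j) (hj : j < (M:Int)) :
    pvSet2 (dpMat f N M) i j v
      = dpMat (fun i' j' => if i' = i.toNat ∧ j' = j.toNat then v else f i' j') N M := by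
  have h1 : i = ((i.toNat : Nat) : Int) := by omega
  have h2 : j = ((j.toNat : Nat) : Int) := by omega
  rw [h1, h2, dpMat_set f N M i.toNat j.toNat (by omega) (by omega)]
  apply dpMat_congr
  intro i' _ j' _
  simp only [Int.toNat_natCast]
  exact if_congr Iff.rfl rfl rfl

lemma phase2 (a b : List Int) (R C : Nat) (m : Nat) (hm : m ≤ R) :
    List.foldl (fun dp (k : Nat) =>
        pvSet2 dp (1+(k:Int)) 0 (pvIdx a (-(1+(k:Int))) - pvGet2 dp (1+(k:Int)-1) 0))
      (dpMat (fun _ _ => 0) (R+1) (C+1)) (List.range m)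
      = dpMat (fun i j => if j = 0 ∧ i ≤ m then pvG a b i 0 else 0) (R+1) (C+1) := by
  induction m with
  | zero =>
    apply dpMat_congr
    intro i hi j hj
    split_ifs with h
    · obtain ⟨h1, h2⟩ := h
      interval_cases i
      simp [pvG]
    · rfl
  | succ n ih =>
    rw [List.range_succ, List.foldl_append, ih (by omega), List.foldl_cons, List.foldl_nil]
    have e1 : (1+(n:Int)-1) = ((n:Nat):Int) := by ring
    have hget : pvGet2 (dpMat (fun i j => if j = 0 ∧ i ≤ n then pvG a b i 0 else 0) (R+1) (C+1))
        ((n:Int)) 0 = pvG a b n 0 := by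
      have := dpMat_get' (fun i j => if j = 0 ∧ i ≤ n then pvG a b i 0 else 0) (R+1) (C+1)
        ((n:Int)) 0 (by omega) (by push_cast; omega) (by omega) (by push_cast; omega)
      simpa using this
    rw [e1, hget]
    rw [dpMat_set' _ (R+1) (C+1) (1+(n:Int)) 0 _ (by omega) (by push_cast; omega) (by omega)
        (by push_cast; omega)]
    apply dpMat_congr
    intro i hi j hj
    have e2 : (1+(n:Int)).toNat = n+1 := by omega
    have e3 : (0:Int).toNat = 0 := rfl
    rw [e2, e3]
    by_cases h : i = n+1 ∧ j = 0
    · obtain ⟨rfl, rfl⟩ := h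
      simp [pvG_succ_zero]
    · rw [if_neg h]
      by_cases hj0 : j = 0
      · subst hj0
        have hin : ¬ (i = n+1) := fun hc => h ⟨hc, rfl⟩
        by_cases hle : i ≤ n
        · rw [if_pos ⟨rfl, hle⟩, if_pos ⟨rfl, by omega⟩]
        · rw [if_neg (by omega), if_neg (by omega)]
      · rw [if_neg (by simp [hj0]), if_neg (by simp [hj0])]

lemma phase3 (a b : List Int) (R C : Nat) (m : Nat) (hm : m ≤ C) :
    List.foldl (fun dp (k : Nat) =>
        pvSet2 dp 0 (1+(k:Int)) (pvIdx b (-(1+(k:Int))) - pvGet2 dp 0 (1+(k:Int)-1)))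
      (dpMat (fun i j => if j = 0 then pvG a b i 0 else 0) (R+1) (C+1)) (List.range m)
      = dpMat (fun i j => if j = 0 then pvG a b i 0
               else if i = 0 ∧ j ≤ m then pvG a b 0 j else 0) (R+1) (C+1) := by
  induction m with
  | zero =>
    apply dpMat_congr
    intro i hi j hj
    by_cases hj0 : j = 0
    · simp [hj0]
    · rw [if_neg hj0, if_neg hj0, if_neg (by omega)]
  | succ n ih =>
    rw [List.range_succ, List.foldl_append, ih (by omega), List.foldl_cons, List.foldl_nil]
    have e1 : (1+(n:Int)-1) = ((n:Nat):Int) := by ring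
    have hget : pvGet2 (dpMat (fun i j => if j = 0 then pvG a b i 0
          else if i = 0 ∧ j ≤ n then pvG a b 0 j else 0) (R+1) (C+1))
        0 ((n:Int)) = pvG a b 0 n := by
      have := dpMat_get' (fun i j => if j = 0 then pvG a b i 0
          else if i = 0 ∧ j ≤ n then pvG a b 0 j else 0) (R+1) (C+1)
        0 ((n:Int)) (by omega) (by push_cast; omega) (by omega) (by push_cast; omega)
      rw [this]
      rcases Nat.eq_zero_or_pos n with h0 | h0
      · simp [h0, pvG]
      · simp [Nat.pos_iff_ne_zero.mp h0]
    rw [e1, hget]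
    rw [dpMat_set' _ (R+1) (C+1) 0 (1+(n:Int)) _ (by omega) (by push_cast; omega) (by omega)
        (by push_cast; omega)]
    apply dpMat_congr
    intro i hi j hj
    have e2 : (1+(n:Int)).toNat = n+1 := by omega
    have e3 : (0:Int).toNat = 0 := rfl
    rw [e2, e3]
    by_cases h : i = 0 ∧ j = n+1
    · obtain ⟨rfl, rfl⟩ := h
      rw [if_pos ⟨rfl, rfl⟩, if_neg (by omega), if_pos ⟨rfl, le_refl _⟩, pvG_zero_succ]
    · rw [if_neg h]
      by_cases hj0 : j = 0
      · simp [hj0]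
      · rw [if_neg hj0, if_neg hj0]
        by_cases hcase : i = 0 ∧ j ≤ n
        · rw [if_pos hcase, if_pos ⟨hcase.1, by omega⟩]
        · rw [if_neg hcase, if_neg (by
            rintro ⟨rfl, hle⟩
            exact hcase ⟨rfl, by omega⟩)]

lemma phase4inner (a b : List Int) (R C : Nat) (r : Nat) (hr : r + 1 ≤ R) (m : Nat) (hm : m ≤ C) :
    List.foldl (fun dp (k : Nat) =>
        pvSet2 dp (1+(r:Int)) (1+(k:Int))
          (max (pvIdx a (-(1+(r:Int))) - pvGet2 dp (1+(r:Int)-1) (1+(k:Int)))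
               (pvIdx b (-(1+(k:Int))) - pvGet2 dp (1+(r:Int)) (1+(k:Int)-1))))
      (dpMat (fun i j => if i ≤ r ∨ j = 0 then pvG a b i j else 0) (R+1) (C+1)) (List.range m)
      = dpMat (fun i j => if i ≤ r ∨ j = 0 ∨ (i = r+1 ∧ j ≤ m) then pvG a b i j else 0)
          (R+1) (C+1) := by
  induction m with
  | zero =>
    apply dpMat_congr
    intro i hi j hj
    by_cases h : i ≤ r ∨ j = 0
    · rw [if_pos h, if_pos (by tauto)]
    · rw [if_neg h, if_neg (by omega)]
  | succ n ih =>
    rw [List.range_succ, List.foldl_append, ih (by omega), List.foldl_cons, List.foldl_nil]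
    have e1 : (1+(r:Int)-1) = ((r:Nat):Int) := by ring
    have e2 : (1+(n:Int)-1) = ((n:Nat):Int) := by ring
    have hget1 : pvGet2 (dpMat (fun i j => if i ≤ r ∨ j = 0 ∨ (i = r+1 ∧ j ≤ n) then pvG a b i j else 0) (R+1) (C+1))
        ((r:Nat):Int) (1+(n:Int)) = pvG a b r (n+1) := by
      have := dpMat_get' (fun i j => if i ≤ r ∨ j = 0 ∨ (i = r+1 ∧ j ≤ n) then pvG a b i j else 0)
        (R+1) (C+1) ((r:Nat):Int) (1+(n:Int)) (by omega) (by push_cast; omega) (by omega) (by push_cast; omega)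
      rw [this]
      have e : ((1:Int)+(n:Int)).toNat = n+1 := by omega
      rw [e, Int.toNat_natCast]
      beta_reduce
      rw [if_pos (Or.inl (le_refl r))]
    have hget2 : pvGet2 (dpMat (fun i j => if i ≤ r ∨ j = 0 ∨ (i = r+1 ∧ j ≤ n) then pvG a b i j else 0) (R+1) (C+1))
        (1+(r:Int)) ((n:Nat):Int) = pvG a b (r+1) n := by
      have := dpMat_get' (fun i j => if i ≤ r ∨ j = 0 ∨ (i = r+1 ∧ j ≤ n) then pvG a b i j else 0)
        (R+1) (C+1) (1+(r:Int)) ((n:Nat):Int) (by omega) (by push_cast; omega) (by omega) (by push_cast; omega)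
      rw [this]
      have e : ((1:Int)+(r:Int)).toNat = r+1 := by omega
      rw [e, Int.toNat_natCast]
      beta_reduce
      rcases Nat.eq_zero_or_pos n with h0 | h0
      · rw [if_pos (by omega)]
      · rw [if_pos (Or.inr (Or.inr ⟨rfl, le_refl n⟩))]
    rw [e1, e2, hget1, hget2]
    rw [dpMat_set' _ (R+1) (C+1) (1+(r:Int)) (1+(n:Int)) _ (by omega) (by push_cast; omega)
        (by omega) (by push_cast; omega)]
    apply dpMat_congr
    intro i hi j hj
    have e3 : ((1:Int)+(r:Int)).toNat = r+1 := by omega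
    have e4 : ((1:Int)+(n:Int)).toNat = n+1 := by omega
    rw [e3, e4]
    by_cases h : i = r+1 ∧ j = n+1
    · obtain ⟨rfl, rfl⟩ := h
      rw [if_pos ⟨rfl, rfl⟩, if_pos (Or.inr (Or.inr ⟨rfl, le_refl _⟩)), pvG_succ_succ]
    · rw [if_neg h]
      by_cases hc : i ≤ r ∨ j = 0 ∨ (i = r+1 ∧ j ≤ n)
      · rw [if_pos hc, if_pos (by omega)]
      · rw [if_neg hc, if_neg (by omega)]

lemma phase4 (a b : List Int) (R C : Nat) (m : Nat) (hm : m ≤ R) :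
    List.foldl (fun dp (k : Nat) =>
        List.foldl (fun dp (k' : Nat) =>
            pvSet2 dp (1+(k:Int)) (1+(k':Int))
              (max (pvIdx a (-(1+(k:Int))) - pvGet2 dp (1+(k:Int)-1) (1+(k':Int)))
                   (pvIdx b (-(1+(k':Int))) - pvGet2 dp (1+(k:Int)) (1+(k':Int)-1))))
          dp (List.range C))
      (dpMat (fun i j => if j = 0 then pvG a b i 0
              else if i = 0 ∧ j ≤ C then pvG a b 0 j else 0) (R+1) (C+1))
      (List.range m)
      = dpMat (fun i j => if i ≤ m ∨ j = 0 then pvG a b i j else 0) (R+1) (C+1) := by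
  induction m with
  | zero =>
    apply dpMat_congr
    intro i hi j hj
    by_cases hj0 : j = 0
    · subst hj0
      rw [if_pos rfl, if_pos (Or.inr rfl)]
    · rw [if_neg hj0]
      by_cases hi0 : i = 0
      · subst hi0
        rw [if_pos ⟨rfl, by omega⟩, if_pos (Or.inl (le_refl 0))]
      · rw [if_neg (by tauto), if_neg (by omega)]
  | succ n ih =>
    rw [List.range_succ, List.foldl_append, ih (by omega), List.foldl_cons, List.foldl_nil]
    rw [phase4inner a b R C n (by omega) C le_rfl]
    apply dpMat_congr
    intro i hi j hj
    by_cases hc : i ≤ n ∨ j = 0 ∨ (i = n+1 ∧ j ≤ C)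
    · rw [if_pos hc, if_pos (by omega)]
    · rw [if_neg hc, if_neg (by omega)]

lemma solveA_eq (A B : Int) (a b : List Int) (R C : Nat) (hA : A = (R:Int)) (hB : B = (C:Int)) :
    solve A B a b = PySem.Int.floordiv (a.sum + b.sum + pvG a b R C) 2 := by
  subst hA hB
  simp only [solve, pyRange_natcast, List.foldl_map]
  have hdp0 : (PySem.List.pyRange 0 ((R:Int)+1) 1).map (fun _ => List.replicate ((C:Int)+1).toNat (0:Int))
      = dpMat (fun _ _ => 0) (R+1) (C+1) := by
    have hlen : (((R:Int)+1) - 0).toNat = R+1 := by omega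
    have hC : ((C:Int)+1).toNat = C+1 := by omega
    rw [hC, List.map_const', PySem.List.length_pyRange_one, hlen, dpMat, List.map_const',
        List.length_range]
    congr 1
    rw [List.map_const', List.length_range]
  rw [hdp0]
  have hdp1 : pvSet2 (dpMat (fun _ _ => (0:Int)) (R+1) (C+1)) 0 0 0
      = dpMat (fun _ _ => (0:Int)) (R+1) (C+1) := by
    rw [dpMat_set' _ (R+1) (C+1) 0 0 0 (by omega) (by push_cast; omega) (by omega) (by push_cast; omega)]
    apply dpMat_congr
    intro i _ j _
    split_ifs <;> rfl
  rw [hdp1, phase2 a b R C R le_rfl]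
  have h23 : dpMat (fun i j => if j = 0 ∧ i ≤ R then pvG a b i 0 else 0) (R+1) (C+1)
      = dpMat (fun i j => if j = 0 then pvG a b i 0 else 0) (R+1) (C+1) := by
    apply dpMat_congr
    intro i hi j hj
    by_cases hj0 : j = 0
    · rw [if_pos ⟨hj0, by omega⟩, if_pos hj0]
    · rw [if_neg (by tauto), if_neg hj0]
  rw [h23, phase3 a b R C C le_rfl, phase4 a b R C R le_rfl]
  have hfin : pvGet2 (dpMat (fun i j => if i ≤ R ∨ j = 0 then pvG a b i j else 0) (R+1) (C+1))
      ((R:Nat):Int) ((C:Nat):Int) = pvG a b R C := by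
    have := dpMat_get' (fun i j => if i ≤ R ∨ j = 0 then pvG a b i j else 0) (R+1) (C+1)
      ((R:Nat):Int) ((C:Nat):Int) (by omega) (by push_cast; omega) (by omega) (by push_cast; omega)
    rw [this, Int.toNat_natCast, Int.toNat_natCast]
    beta_reduce
    rw [if_pos (Or.inl (le_refl R))]
  rw [hfin]

-- ---------- B-side: the DFS memoizes pvG ----------

-- every binding the DFS ever creates is a correct cell value
def pvInv (a b : List Int) (m : PySem.Dict (Int × Int) Int) : Prop :=
  ∀ p v, m.get? p = some v → ∃ x y : Nat, p = ((x:Int), (y:Int)) ∧ v = pvG a b x y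

-- forcing one stack occurrence of cell (i, j): the memo it leaves behind and the number
-- of while-loop iterations that occurrence consumes; it mirrors the pvDfs trace
def pvForce (a b : List Int) (m : PySem.Dict (Int × Int) Int) (i j : Nat) :
    PySem.Dict (Int × Int) Int × Nat :=
  if (m.get? ((i:Int), (j:Int))).isSome then (m, 1)
  else if (i:Int) = 0 ∧ (j:Int) = 0 then (m.insert ((i:Int), (j:Int)) 0, 1)
  else if (0 < (i:Int) ∧ (m.get? ((i:Int) - 1, (j:Int))).isNone) ∨
          (0 < (j:Int) ∧ (m.get? ((i:Int), (j:Int) - 1)).isNone) then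
    let r1 := if h2 : 0 < (j:Int) ∧ (m.get? ((i:Int), (j:Int) - 1)).isNone
              then pvForce a b m i (j-1) else (m, 0)
    let r2 := if h1 : 0 < (i:Int) ∧ (m.get? ((i:Int) - 1, (j:Int))).isNone
              then pvForce a b r1.1 (i-1) j else (r1.1, 0)
    (r2.1.insert ((i:Int), (j:Int)) (pvVal a b r2.1 (i:Int) (j:Int)), 2 + r1.2 + r2.2)
  else (m.insert ((i:Int), (j:Int)) (pvVal a b m (i:Int) (j:Int)), 1)
termination_by i + j
decreasing_by all_goals omega

lemma pvVal_correct (a b : List Int) (m : PySem.Dict (Int × Int) Int) (i j : Nat)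
    (hinv : pvInv a b m) (hij : ¬(i = 0 ∧ j = 0))
    (hdi : 0 < i → (m.get? ((i:Int) - 1, (j:Int))).isSome)
    (hdj : 0 < j → (m.get? ((i:Int), (j:Int) - 1)).isSome) :
    pvVal a b m (i:Int) (j:Int) = pvG a b i j := by
  rcases i with _ | k <;> rcases j with _ | l
  · exact absurd ⟨rfl, rfl⟩ hij
  · have hd := hdj (Nat.succ_pos l)
    obtain ⟨v, hv⟩ := Option.isSome_iff_exists.mp hd
    obtain ⟨x, y, hkey, hval⟩ := hinv _ _ hv
    have hxy : x = 0 ∧ y = l := by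
      rw [Prod.mk.injEq] at hkey
      obtain ⟨h1, h2⟩ := hkey
      push_cast at h1 h2
      omega
    obtain ⟨rfl, rfl⟩ := hxy
    simp only [pvVal, hv]
    rw [if_neg (by push_cast; omega), if_pos (by push_cast)]
    rw [hval, pvG_zero_succ]
    norm_num
    congr 1
    ring
  · have hd := hdi (Nat.succ_pos k)
    obtain ⟨v, hv⟩ := Option.isSome_iff_exists.mp hd
    obtain ⟨x, y, hkey, hval⟩ := hinv _ _ hv
    have hxy : x = k ∧ y = 0 := by
      rw [Prod.mk.injEq] at hkey
      obtain ⟨h1, h2⟩ := hkey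
      push_cast at h1 h2
      omega
    obtain ⟨rfl, rfl⟩ := hxy
    simp only [pvVal, hv]
    rw [if_pos (by push_cast)]
    rw [hval, pvG_succ_zero]
    norm_num
    congr 1
    ring
  · have hd1 := hdi (Nat.succ_pos k)
    have hd2 := hdj (Nat.succ_pos l)
    obtain ⟨v1, hv1⟩ := Option.isSome_iff_exists.mp hd1
    obtain ⟨v2, hv2⟩ := Option.isSome_iff_exists.mp hd2
    obtain ⟨x1, y1, hkey1, hval1⟩ := hinv _ _ hv1
    obtain ⟨x2, y2, hkey2, hval2⟩ := hinv _ _ hv2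
    have hxy1 : x1 = k ∧ y1 = l + 1 := by
      rw [Prod.mk.injEq] at hkey1
      obtain ⟨h1, h2⟩ := hkey1
      push_cast at h1 h2
      omega
    have hxy2 : x2 = k + 1 ∧ y2 = l := by
      rw [Prod.mk.injEq] at hkey2
      obtain ⟨h1, h2⟩ := hkey2
      push_cast at h1 h2
      omega
    obtain ⟨rfl, rfl⟩ := hxy1
    obtain ⟨rfl, rfl⟩ := hxy2
    simp only [pvVal, hv1, hv2]
    rw [if_neg (by push_cast; omega), if_neg (by push_cast; omega)]
    rw [hval1, hval2, pvG_succ_succ]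
    simp only [Option.getD_some]
    push_cast
    ring_nf

lemma pvForce_cost (a b : List Int) : ∀ (n : Nat) (m : PySem.Dict (Int × Int) Int) (i j : Nat),
    i + j ≤ n → (pvForce a b m i j).2 ≤ 2 ^ (i + j + 2) - 2 := by
  intro n
  induction n with
  | zero =>
    intro m i j hn
    have hi : i = 0 := by omega
    have hj : j = 0 := by omega
    subst hi hj
    rw [pvForce.eq_def]
    by_cases hmem : (m.get? (((0:Nat):Int), ((0:Nat):Int))).isSome
    · rw [if_pos hmem]
      norm_num
    · rw [if_neg hmem, if_pos (by norm_num)]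
      norm_num
  | succ n ih =>
    intro m i j hn
    have h4 : 4 ≤ 2 ^ (i + j + 2) := by
      calc (4:Nat) = 2 ^ 2 := by norm_num
      _ ≤ 2 ^ (i + j + 2) := Nat.pow_le_pow_right (by norm_num) (by omega)
    have hpow : 2 ^ (i + j + 2) = 2 * 2 ^ (i + j + 1) := by
      rw [show i + j + 2 = (i + j + 1) + 1 from rfl, pow_succ]
      ring
    rw [pvForce.eq_def]
    by_cases hmem : (m.get? ((i:Int), (j:Int))).isSome
    · rw [if_pos hmem]; simp; omega
    rw [if_neg hmem]
    by_cases hbase : (i:Int) = 0 ∧ (j:Int) = 0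
    · rw [if_pos hbase]; simp; omega
    rw [if_neg hbase]
    by_cases hpush : (0 < (i:Int) ∧ (m.get? ((i:Int) - 1, (j:Int))).isNone) ∨
        (0 < (j:Int) ∧ (m.get? ((i:Int), (j:Int) - 1)).isNone)
    · rw [if_pos hpush]
      by_cases h2p : 0 < (j:Int) ∧ (m.get? ((i:Int), (j:Int) - 1)).isNone
      · have hc1 : (pvForce a b m i (j-1)).2 ≤ 2 ^ (i + j + 1) - 2 := by
          have := ih m i (j-1) (by omega)
          have he : i + (j-1) + 2 = i + j + 1 := by omega
          rwa [he] at this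
        by_cases h1p : 0 < (i:Int) ∧ (m.get? ((i:Int) - 1, (j:Int))).isNone
        · have hc2 : (pvForce a b (pvForce a b m i (j-1)).1 (i-1) j).2 ≤ 2 ^ (i + j + 1) - 2 := by
            have := ih (pvForce a b m i (j-1)).1 (i-1) j (by omega)
            have he : (i-1) + j + 2 = i + j + 1 := by omega
            rwa [he] at this
          simp only [dif_pos h2p, dif_pos h1p]
          simp
          omega
        · simp only [dif_pos h2p, dif_neg h1p]
          simp
          omega
      · have h1p : 0 < (i:Int) ∧ (m.get? ((i:Int) - 1, (j:Int))).isNone := by tauto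
        have hc2 : (pvForce a b m (i-1) j).2 ≤ 2 ^ (i + j + 1) - 2 := by
          have := ih m (i-1) j (by omega)
          have he : (i-1) + j + 2 = i + j + 1 := by omega
          rwa [he] at this
        simp only [dif_neg h2p, dif_pos h1p]
        simp
        omega
    · rw [if_neg hpush]; simp; omega

lemma pvForce_cost_pos (a b : List Int) (m : PySem.Dict (Int × Int) Int) (i j : Nat) :
    1 ≤ (pvForce a b m i j).2 := by
  rw [pvForce.eq_def]
  split_ifs <;> (try simp) <;> omega

lemma pvKey_inj (x y x' y' : Nat) :
    (((x:Int), (y:Int)) : Int × Int) = ((x':Int), (y':Int)) ↔ x = x' ∧ y = y' := by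
  rw [Prod.mk.injEq]
  omega

lemma pvInsert_pack (a b : List Int) (m0 morig : PySem.Dict (Int × Int) Int) (i j : Nat)
    (hinv0 : pvInv a b m0)
    (hij : ¬(i = 0 ∧ j = 0))
    (hdi : 0 < i → (m0.get? ((i:Int) - 1, (j:Int))).isSome)
    (hdj : 0 < j → (m0.get? ((i:Int), (j:Int) - 1)).isSome)
    (hmem : ¬ (morig.get? ((i:Int), (j:Int))).isSome = true)
    (hpres : ∀ p, (morig.get? p).isSome → m0.get? p = morig.get? p)
    (hbox : ∀ p, (m0.get? p).isSome →
        (morig.get? p).isSome ∨ ∃ x y : Nat, p = ((x:Int), (y:Int)) ∧ x ≤ i ∧ y ≤ j) :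
    pvInv a b (m0.insert ((i:Int), (j:Int)) (pvVal a b m0 (i:Int) (j:Int))) ∧
    (∀ p, (morig.get? p).isSome →
        (m0.insert ((i:Int), (j:Int)) (pvVal a b m0 (i:Int) (j:Int))).get? p = morig.get? p) ∧
    ((m0.insert ((i:Int), (j:Int)) (pvVal a b m0 (i:Int) (j:Int))).get? ((i:Int), (j:Int))).isSome ∧
    (∀ p, ((m0.insert ((i:Int), (j:Int)) (pvVal a b m0 (i:Int) (j:Int))).get? p).isSome →
        (morig.get? p).isSome ∨ ∃ x y : Nat, p = ((x:Int), (y:Int)) ∧ x ≤ i ∧ y ≤ j) := by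
  have hvc : pvVal a b m0 (i:Int) (j:Int) = pvG a b i j :=
    pvVal_correct a b m0 i j hinv0 hij hdi hdj
  refine ⟨?_, ?_, ?_, ?_⟩
  · intro p v hpv
    rw [PySem.Dict.get?_insert] at hpv
    by_cases hp : p = ((i:Int), (j:Int))
    · rw [if_pos hp] at hpv
      exact ⟨i, j, hp, by injection hpv with h; rw [← h, hvc]⟩
    · rw [if_neg hp] at hpv
      exact hinv0 p v hpv
  · intro p hp
    have hne : p ≠ ((i:Int), (j:Int)) := by
      intro h
      rw [h] at hp
      exact hmem hp
    rw [PySem.Dict.get?_insert, if_neg hne]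
    exact hpres p hp
  · rw [PySem.Dict.get?_insert_self]
    rfl
  · intro p hp
    rw [PySem.Dict.get?_insert] at hp
    by_cases hpk : p = ((i:Int), (j:Int))
    · exact Or.inr ⟨i, j, hpk, le_refl _, le_refl _⟩
    · rw [if_neg hpk] at hp
      exact hbox p hp

lemma pvForce_main (a b : List Int) : ∀ (n : Nat) (i j : Nat), i + j ≤ n →
    ∀ (m : PySem.Dict (Int × Int) Int), pvInv a b m →
    pvInv a b (pvForce a b m i j).1 ∧
    (∀ p, (m.get? p).isSome → (pvForce a b m i j).1.get? p = m.get? p) ∧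
    ((pvForce a b m i j).1.get? ((i:Int), (j:Int))).isSome ∧
    (∀ p, ((pvForce a b m i j).1.get? p).isSome →
        (m.get? p).isSome ∨ ∃ x y : Nat, p = ((x:Int), (y:Int)) ∧ x ≤ i ∧ y ≤ j) := by
  intro n
  induction n with
  | zero =>
    intro i j hn m hinv
    have hi : i = 0 := by omega
    have hj : j = 0 := by omega
    subst hi hj
    rw [pvForce.eq_def]
    by_cases hmem : (m.get? (((0:Nat):Int), ((0:Nat):Int))).isSome
    · rw [if_pos hmem]
      exact ⟨hinv, fun p _ => rfl, hmem, fun p hp => Or.inl hp⟩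
    · rw [if_neg hmem, if_pos (by norm_num)]
      refine ⟨?_, ?_, ?_, ?_⟩
      · intro p v hpv
        rw [PySem.Dict.get?_insert] at hpv
        by_cases hp : p = (((0:Nat):Int), ((0:Nat):Int))
        · rw [if_pos hp] at hpv
          exact ⟨0, 0, hp, by injection hpv with h; rw [← h, pvG]⟩
        · rw [if_neg hp] at hpv
          exact hinv p v hpv
      · intro p hp
        have hne : p ≠ (((0:Nat):Int), ((0:Nat):Int)) := by
          intro h
          rw [h] at hp
          exact hmem hp
        rw [PySem.Dict.get?_insert, if_neg hne]
      · rw [PySem.Dict.get?_insert_self]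
        rfl
      · intro p hp
        rw [PySem.Dict.get?_insert] at hp
        by_cases hpk : p = (((0:Nat):Int), ((0:Nat):Int))
        · exact Or.inr ⟨0, 0, hpk, le_refl _, le_refl _⟩
        · rw [if_neg hpk] at hp
          exact Or.inl hp
  | succ n ih =>
    intro i j hn m hinv
    rw [pvForce.eq_def]
    by_cases hmem : (m.get? ((i:Int), (j:Int))).isSome
    · rw [if_pos hmem]
      exact ⟨hinv, fun p _ => rfl, hmem, fun p hp => Or.inl hp⟩
    rw [if_neg hmem]
    by_cases hbase : (i:Int) = 0 ∧ (j:Int) = 0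
    · rw [if_pos hbase]
      have hi : i = 0 := by omega
      have hj : j = 0 := by omega
      subst hi hj
      refine ⟨?_, ?_, ?_, ?_⟩
      · intro p v hpv
        rw [PySem.Dict.get?_insert] at hpv
        by_cases hp : p = (((0:Nat):Int), ((0:Nat):Int))
        · rw [if_pos hp] at hpv
          exact ⟨0, 0, hp, by injection hpv with h; rw [← h, pvG]⟩
        · rw [if_neg hp] at hpv
          exact hinv p v hpv
      · intro p hp
        have hne : p ≠ (((0:Nat):Int), ((0:Nat):Int)) := by
          intro h
          rw [h] at hp
          exact hmem hp
        rw [PySem.Dict.get?_insert, if_neg hne]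
      · rw [PySem.Dict.get?_insert_self]
        rfl
      · intro p hp
        rw [PySem.Dict.get?_insert] at hp
        by_cases hpk : p = (((0:Nat):Int), ((0:Nat):Int))
        · exact Or.inr ⟨0, 0, hpk, le_refl _, le_refl _⟩
        · rw [if_neg hpk] at hp
          exact Or.inl hp
    rw [if_neg hbase]
    have hij : ¬(i = 0 ∧ j = 0) := by
      intro h
      exact hbase ⟨by omega, by omega⟩
    by_cases hpush : (0 < (i:Int) ∧ (m.get? ((i:Int) - 1, (j:Int))).isNone) ∨
        (0 < (j:Int) ∧ (m.get? ((i:Int), (j:Int) - 1)).isNone)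
    · rw [if_pos hpush]
      -- the two dependency passes
      by_cases h2p : 0 < (j:Int) ∧ (m.get? ((i:Int), (j:Int) - 1)).isNone
      all_goals by_cases h1p : 0 < (i:Int) ∧ (m.get? ((i:Int) - 1, (j:Int))).isNone
      -- both deps forced
      · simp only [dif_pos h2p, dif_pos h1p]
        have hj0 : 0 < j := by omega
        have hi0 : 0 < i := by omega
        have ecj : ((j - 1 : Nat) : Int) = (j:Int) - 1 := by omega
        have eci : ((i - 1 : Nat) : Int) = (i:Int) - 1 := by omega
        obtain ⟨inv1, pres1, self1, box1⟩ := ih i (j-1) (by omega) m hinv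
        obtain ⟨inv2, pres2, self2, box2⟩ :=
          ih (i-1) j (by omega) (pvForce a b m i (j-1)).1 inv1
        rw [ecj] at self1
        rw [eci] at self2
        refine pvInsert_pack a b _ m i j inv2 hij ?_ ?_ hmem ?_ ?_
        · intro _
          exact self2
        · intro _
          rw [pres2 _ self1]
          exact self1
        · intro p hp
          rw [pres2 p (by rw [pres1 p hp]; exact hp), pres1 p hp]
        · intro p hp
          rcases box2 p hp with hp1 | ⟨x, y, hk, hx, hy⟩
          · rcases box1 p hp1 with hp0 | ⟨x, y, hk, hx, hy⟩
            · exact Or.inl hp0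
            · exact Or.inr ⟨x, y, hk, by omega, by omega⟩
          · exact Or.inr ⟨x, y, hk, by omega, by omega⟩
      -- only (i-1, j) forced
      · simp only [dif_pos h2p, dif_neg h1p]
        have hj0 : 0 < j := by omega
        have ecj : ((j - 1 : Nat) : Int) = (j:Int) - 1 := by omega
        obtain ⟨inv1, pres1, self1, box1⟩ := ih i (j-1) (by omega) m hinv
        rw [ecj] at self1
        refine pvInsert_pack a b _ m i j inv1 hij ?_ ?_ hmem ?_ ?_
        · intro hi0
          have hsome : (m.get? ((i:Int) - 1, (j:Int))).isSome := by
            by_cases h : (m.get? ((i:Int) - 1, (j:Int))).isSome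
            · exact h
            · rw [Option.not_isSome_iff_eq_none] at h
              exact absurd ⟨by omega, by rw [h]; rfl⟩ h1p
          rw [pres1 _ hsome]
          exact hsome
        · intro _
          exact self1
        · intro p hp
          exact pres1 p hp
        · intro p hp
          rcases box1 p hp with hp0 | ⟨x, y, hk, hx, hy⟩
          · exact Or.inl hp0
          · exact Or.inr ⟨x, y, hk, by omega, by omega⟩
      -- only (j) side memoized already, force (i-1, j)
      · simp only [dif_neg h2p, dif_pos h1p]
        have hi0 : 0 < i := by omega
        have eci : ((i - 1 : Nat) : Int) = (i:Int) - 1 := by omega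
        obtain ⟨inv2, pres2, self2, box2⟩ := ih (i-1) j (by omega) m hinv
        rw [eci] at self2
        refine pvInsert_pack a b _ m i j inv2 hij ?_ ?_ hmem ?_ ?_
        · intro _
          exact self2
        · intro hj0
          have hsome : (m.get? ((i:Int), (j:Int) - 1)).isSome := by
            by_cases h : (m.get? ((i:Int), (j:Int) - 1)).isSome
            · exact h
            · rw [Option.not_isSome_iff_eq_none] at h
              exact absurd ⟨by omega, by rw [h]; rfl⟩ h2p
          rw [pres2 _ hsome]
          exact hsome
        · intro p hp
          exact pres2 p hp
        · intro p hp
          rcases box2 p hp with hp0 | ⟨x, y, hk, hx, hy⟩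
          · exact Or.inl hp0
          · exact Or.inr ⟨x, y, hk, by omega, by omega⟩
      · exact absurd hpush (by tauto)
    · rw [if_neg hpush]
      rw [not_or] at hpush
      have hnp1 : 0 < (i:Int) → ¬ (m.get? ((i:Int) - 1, (j:Int))).isNone = true :=
        fun h1 h2 => hpush.1 ⟨h1, h2⟩
      have hnp2 : 0 < (j:Int) → ¬ (m.get? ((i:Int), (j:Int) - 1)).isNone = true :=
        fun h1 h2 => hpush.2 ⟨h1, h2⟩
      refine pvInsert_pack a b m m i j hinv hij ?_ ?_ hmem (fun p _ => rfl) (fun p hp => Or.inl hp)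
      · intro hi0
        by_cases h : (m.get? ((i:Int) - 1, (j:Int))).isSome
        · exact h
        · rw [Option.not_isSome_iff_eq_none] at h
          exact absurd (by rw [h]; rfl) (hnp1 (by omega))
      · intro hj0
        by_cases h : (m.get? ((i:Int), (j:Int) - 1)).isSome
        · exact h
        · rw [Option.not_isSome_iff_eq_none] at h
          exact absurd (by rw [h]; rfl) (hnp2 (by omega))

lemma pvDfs_nil (a b : List Int) (fuel : Nat) (m : PySem.Dict (Int × Int) Int) :
    pvDfs a b fuel [] m = m := by
  cases fuel <;> rfl

lemma pvDfs_run (a b : List Int) : ∀ (n : Nat) (i j : Nat), i + j ≤ n →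
    ∀ (m : PySem.Dict (Int × Int) Int), pvInv a b m →
    ∀ (fuel : Nat) (st : List (Int × Int)), (pvForce a b m i j).2 ≤ fuel →
      pvDfs a b fuel (((i:Int), (j:Int)) :: st) m
        = pvDfs a b (fuel - (pvForce a b m i j).2) st (pvForce a b m i j).1 := by
  intro n
  induction n with
  | zero =>
    intro i j hn m hinv fuel st hfc
    have hi : i = 0 := by omega
    have hj : j = 0 := by omega
    subst hi hj
    have hpos := pvForce_cost_pos a b m 0 0
    obtain ⟨f, rfl⟩ : ∃ f, fuel = f + 1 := ⟨fuel - 1, by omega⟩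
    by_cases hmem : (m.get? (((0:Nat):Int), ((0:Nat):Int))).isSome
    · have hfm : pvForce a b m 0 0 = (m, 1) := by
        rw [pvForce.eq_def, if_pos hmem]
      rw [hfm]
      simp only [pvDfs]
      rw [if_pos hmem]
      simp
    · have hfm : pvForce a b m 0 0 = (m.insert (((0:Nat):Int), ((0:Nat):Int)) 0, 1) := by
        rw [pvForce.eq_def, if_neg hmem, if_pos (by norm_num)]
      rw [hfm]
      simp only [pvDfs]
      rw [if_neg hmem, if_pos (by norm_num)]
      simp
  | succ n ih =>
    intro i j hn m hinv fuel st hfc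
    have hpos := pvForce_cost_pos a b m i j
    obtain ⟨f, rfl⟩ : ∃ f, fuel = f + 1 := ⟨fuel - 1, by omega⟩
    by_cases hmem : (m.get? ((i:Int), (j:Int))).isSome
    · have hfm : pvForce a b m i j = (m, 1) := by
        rw [pvForce.eq_def, if_pos hmem]
      rw [hfm]
      simp only [pvDfs]
      rw [if_pos hmem]
      simp
    by_cases hbase : (i:Int) = 0 ∧ (j:Int) = 0
    · have hfm : pvForce a b m i j = (m.insert ((i:Int), (j:Int)) 0, 1) := by
        rw [pvForce.eq_def, if_neg hmem, if_pos hbase]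
      rw [hfm]
      simp only [pvDfs]
      rw [if_neg hmem, if_pos hbase]
      simp
    by_cases hpush : (0 < (i:Int) ∧ (m.get? ((i:Int) - 1, (j:Int))).isNone) ∨
        (0 < (j:Int) ∧ (m.get? ((i:Int), (j:Int) - 1)).isNone)
    · by_cases h2p : 0 < (j:Int) ∧ (m.get? ((i:Int), (j:Int) - 1)).isNone
      all_goals by_cases h1p : 0 < (i:Int) ∧ (m.get? ((i:Int) - 1, (j:Int))).isNone
      -- both deps pushed: process (i, j-1) first, then (i-1, j), then revisit (i, j)
      · have hj0 : 0 < j := by omega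
        have hi0 : 0 < i := by omega
        have ecj : ((j - 1 : Nat) : Int) = (j:Int) - 1 := by omega
        have eci : ((i - 1 : Nat) : Int) = (i:Int) - 1 := by omega
        set M1 := (pvForce a b m i (j-1)).1 with hM1
        set c1 := (pvForce a b m i (j-1)).2 with hc1
        set M2 := (pvForce a b M1 (i-1) j).1 with hM2
        set c2 := (pvForce a b M1 (i-1) j).2 with hc2
        have hfm : pvForce a b m i j
            = (M2.insert ((i:Int), (j:Int)) (pvVal a b M2 (i:Int) (j:Int)), 2 + c1 + c2) := by
          rw [pvForce.eq_def, if_neg hmem, if_neg hbase, if_pos hpush]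
          simp only [dif_pos h2p, dif_pos h1p]
          rfl
        rw [hfm] at hfc ⊢
        have hfc2 : 2 + c1 + c2 ≤ f + 1 := hfc
        have main1 := pvForce_main a b (i + j) i (j-1) (by omega) m hinv
        rw [← hM1] at main1
        have main2 := pvForce_main a b (i + j) (i-1) j (by omega) M1 main1.1
        rw [← hM2] at main2
        simp only [pvDfs]
        rw [if_neg hmem, if_neg hbase, if_pos h1p, if_pos h2p, if_neg (by simp)]
        simp only [List.reverse_cons, List.reverse_nil, List.nil_append, List.cons_append]
        rw [show ((i:Int), (j:Int) - 1) = ((i:Int), ((j - 1 : Nat) : Int)) by rw [ecj],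
            ih i (j-1) (by omega) m hinv f _ (by omega)]
        rw [← hM1, ← hc1]
        rw [show ((i:Int) - 1, (j:Int)) = (((i - 1 : Nat) : Int), (j:Int)) by rw [eci],
            ih (i-1) j (by omega) M1 main1.1 (f - c1) _ (by omega)]
        rw [← hM2, ← hc2]
        have hg : f - c1 - c2 = (f - c1 - c2 - 1) + 1 := by omega
        rw [hg]
        simp only [pvDfs]
        have hs2 : (M2.get? ((i:Int) - 1, (j:Int))).isSome := by
          have h2 := main2.2.2.1
          rwa [eci] at h2
        have hs1 : (M2.get? ((i:Int), (j:Int) - 1)).isSome := by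
          have h1 := main1.2.2.1
          rw [ecj] at h1
          rw [main2.2.1 _ h1]
          exact h1
        have hkeyM2 : ¬ (M2.get? ((i:Int), (j:Int))).isSome = true := by
          intro hs
          rcases main2.2.2.2 _ hs with h | ⟨x, y, hk, hx, hy⟩
          · rcases main1.2.2.2 _ h with h0 | ⟨x, y, hk, hx, hy⟩
            · exact hmem h0
            · obtain ⟨rfl, rfl⟩ := (pvKey_inj i j x y).mp hk
              omega
          · obtain ⟨rfl, rfl⟩ := (pvKey_inj i j x y).mp hk
            omega
        have hn1 : ¬ (0 < (i:Int) ∧ (M2.get? ((i:Int) - 1, (j:Int))).isNone = true) := by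
          intro hc
          rw [Option.isNone_iff_eq_none] at hc
          rw [hc.2] at hs2
          cases hs2
        have hn2 : ¬ (0 < (j:Int) ∧ (M2.get? ((i:Int), (j:Int) - 1)).isNone = true) := by
          intro hc
          rw [Option.isNone_iff_eq_none] at hc
          rw [hc.2] at hs1
          cases hs1
        rw [if_neg hkeyM2, if_neg hbase]
        simp only [if_neg hn1, if_neg hn2, List.nil_append]
        have he : f + 1 - (2 + c1 + c2) = f - c1 - c2 - 1 := by omega
        rw [he]
        simp
      -- only the b-side dependency (i, j-1) is missing
      · have hj0 : 0 < j := by omega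
        have ecj : ((j - 1 : Nat) : Int) = (j:Int) - 1 := by omega
        set M1 := (pvForce a b m i (j-1)).1 with hM1
        set c1 := (pvForce a b m i (j-1)).2 with hc1
        have hfm : pvForce a b m i j
            = (M1.insert ((i:Int), (j:Int)) (pvVal a b M1 (i:Int) (j:Int)), 2 + c1 + 0) := by
          rw [pvForce.eq_def, if_neg hmem, if_neg hbase, if_pos hpush]
          simp only [dif_pos h2p, dif_neg h1p]
          rfl
        rw [hfm] at hfc ⊢
        have hfc2 : 2 + c1 + 0 ≤ f + 1 := hfc
        have main1 := pvForce_main a b (i + j) i (j-1) (by omega) m hinv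
        rw [← hM1] at main1
        simp only [pvDfs]
        rw [if_neg hmem, if_neg hbase, if_neg h1p, if_pos h2p, if_neg (by simp)]
        simp only [List.reverse_cons, List.reverse_nil, List.nil_append, List.cons_append]
        rw [show ((i:Int), (j:Int) - 1) = ((i:Int), ((j - 1 : Nat) : Int)) by rw [ecj],
            ih i (j-1) (by omega) m hinv f _ (by omega)]
        rw [← hM1, ← hc1]
        have hg : f - c1 = (f - c1 - 1) + 1 := by omega
        rw [hg]
        simp only [pvDfs]
        have hs1 : (M1.get? ((i:Int), (j:Int) - 1)).isSome := by
          have h1 := main1.2.2.1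
          rwa [ecj] at h1
        have hkeyM1 : ¬ (M1.get? ((i:Int), (j:Int))).isSome = true := by
          intro hs
          rcases main1.2.2.2 _ hs with h0 | ⟨x, y, hk, hx, hy⟩
          · exact hmem h0
          · obtain ⟨rfl, rfl⟩ := (pvKey_inj i j x y).mp hk
            omega
        have hn1 : ¬ (0 < (i:Int) ∧ (M1.get? ((i:Int) - 1, (j:Int))).isNone = true) := by
          intro hc
          have hsm : (m.get? ((i:Int) - 1, (j:Int))).isSome := by
            by_cases h : (m.get? ((i:Int) - 1, (j:Int))).isSome
            · exact h
            · rw [Option.not_isSome_iff_eq_none] at h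
              exact absurd ⟨hc.1, by rw [h]; rfl⟩ h1p
          rw [Option.isNone_iff_eq_none] at hc
          rw [main1.2.1 _ hsm] at hc
          rw [hc.2] at hsm
          cases hsm
        have hn2 : ¬ (0 < (j:Int) ∧ (M1.get? ((i:Int), (j:Int) - 1)).isNone = true) := by
          intro hc
          rw [Option.isNone_iff_eq_none] at hc
          rw [hc.2] at hs1
          cases hs1
        rw [if_neg hkeyM1, if_neg hbase]
        simp only [if_neg hn1, if_neg hn2, List.nil_append]
        have he : f + 1 - (2 + c1 + 0) = f - c1 - 1 := by omega
        rw [he]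
        simp
      -- only the a-side dependency (i-1, j) is missing
      · have hi0 : 0 < i := by omega
        have eci : ((i - 1 : Nat) : Int) = (i:Int) - 1 := by omega
        set M2 := (pvForce a b m (i-1) j).1 with hM2
        set c2 := (pvForce a b m (i-1) j).2 with hc2
        have hfm : pvForce a b m i j
            = (M2.insert ((i:Int), (j:Int)) (pvVal a b M2 (i:Int) (j:Int)), 2 + 0 + c2) := by
          rw [pvForce.eq_def, if_neg hmem, if_neg hbase, if_pos hpush]
          simp only [dif_neg h2p, dif_pos h1p]
          rfl
        rw [hfm] at hfc ⊢
        have hfc2 : 2 + 0 + c2 ≤ f + 1 := hfc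
        have main2 := pvForce_main a b (i + j) (i-1) j (by omega) m hinv
        rw [← hM2] at main2
        simp only [pvDfs]
        rw [if_neg hmem, if_neg hbase, if_pos h1p, if_neg h2p, if_neg (by simp)]
        simp only [List.reverse_cons, List.reverse_nil, List.nil_append, List.cons_append,
          List.append_nil]
        rw [show ((i:Int) - 1, (j:Int)) = (((i - 1 : Nat) : Int), (j:Int)) by rw [eci],
            ih (i-1) j (by omega) m hinv f _ (by omega)]
        rw [← hM2, ← hc2]
        have hg : f - c2 = (f - c2 - 1) + 1 := by omega
        rw [hg]
        simp only [pvDfs]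
        have hs2 : (M2.get? ((i:Int) - 1, (j:Int))).isSome := by
          have h2 := main2.2.2.1
          rwa [eci] at h2
        have hkeyM2 : ¬ (M2.get? ((i:Int), (j:Int))).isSome = true := by
          intro hs
          rcases main2.2.2.2 _ hs with h0 | ⟨x, y, hk, hx, hy⟩
          · exact hmem h0
          · obtain ⟨rfl, rfl⟩ := (pvKey_inj i j x y).mp hk
            omega
        have hn2 : ¬ (0 < (j:Int) ∧ (M2.get? ((i:Int), (j:Int) - 1)).isNone = true) := by
          intro hc
          have hsm : (m.get? ((i:Int), (j:Int) - 1)).isSome := by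
            by_cases h : (m.get? ((i:Int), (j:Int) - 1)).isSome
            · exact h
            · rw [Option.not_isSome_iff_eq_none] at h
              exact absurd ⟨hc.1, by rw [h]; rfl⟩ h2p
          rw [Option.isNone_iff_eq_none] at hc
          rw [main2.2.1 _ hsm] at hc
          rw [hc.2] at hsm
          cases hsm
        have hn1 : ¬ (0 < (i:Int) ∧ (M2.get? ((i:Int) - 1, (j:Int))).isNone = true) := by
          intro hc
          rw [Option.isNone_iff_eq_none] at hc
          rw [hc.2] at hs2
          cases hs2
        rw [if_neg hkeyM2, if_neg hbase]
        simp only [if_neg hn1, if_neg hn2, List.nil_append]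
        have he : f + 1 - (2 + 0 + c2) = f - c2 - 1 := by omega
        rw [he]
        simp
      · exact absurd hpush (by tauto)
    · have hfm : pvForce a b m i j
          = (m.insert ((i:Int), (j:Int)) (pvVal a b m (i:Int) (j:Int)), 1) := by
        rw [pvForce.eq_def, if_neg hmem, if_neg hbase, if_neg hpush]
      rw [hfm]
      have hn1 : ¬ (0 < (i:Int) ∧ (m.get? ((i:Int) - 1, (j:Int))).isNone = true) :=
        fun hc => hpush (Or.inl hc)
      have hn2 : ¬ (0 < (j:Int) ∧ (m.get? ((i:Int), (j:Int) - 1)).isNone = true) :=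
        fun hc => hpush (Or.inr hc)
      simp only [pvDfs]
      rw [if_neg hmem, if_neg hbase, if_neg hn1, if_neg hn2]
      simp

lemma solveB_eq (A B : Int) (a b : List Int) (R C : Nat) (hA : A = (R:Int)) (hB : B = (C:Int)) :
    solve_alt A B a b = PySem.Int.floordiv (a.sum + b.sum + pvG a b R C) 2 := by
  subst hA hB
  have hinv : pvInv a b PySem.Dict.empty := by
    intro p v hpv
    rw [PySem.Dict.get?_empty] at hpv
    cases hpv
  have hcost := pvForce_cost a b (R + C) PySem.Dict.empty R C (le_refl _)
  have hfuel : (pvForce a b PySem.Dict.empty R C).2 ≤ 2 ^ (R + C + 2) := by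
    have h1 : (1:Nat) ≤ 2 ^ (R + C + 2) := Nat.one_le_two_pow
    omega
  simp only [solve_alt, Int.toNat_natCast]
  rw [pvDfs_run a b (R + C) R C (le_refl _) PySem.Dict.empty hinv _ [] hfuel, pvDfs_nil]
  have main := pvForce_main a b (R + C) R C (le_refl _) PySem.Dict.empty hinv
  obtain ⟨v, hv⟩ := Option.isSome_iff_exists.mp main.2.2.1
  obtain ⟨x, y, hk, hval⟩ := main.1 _ _ hv
  obtain ⟨rfl, rfl⟩ : R = x ∧ C = y := (pvKey_inj R C x y).mp hk
  rw [hv]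
  simp only [Option.getD_some]
  rw [hval]

-- ===== VERDICT (by name: the statement is the Claim_ definition above) =====
theorem solve_spec : Claim_equal_solve := by
  intro A B a b _ hpre
  obtain ⟨hA0, hB0, _, _⟩ := hpre
  unfold Spec_solve
  rw [solveA_eq A B a b A.toNat B.toNat (by omega) (by omega),
      solveB_eq A B a b A.toNat B.toNat (by omega) (by omega)]
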